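-- pv_equiv track=rewrite | github.com/marlowequart/marlowequart.github.io | large_delta_consol_study_dirty_2019_04_19.py | mid_idx_prefilter
-- ===== SOURCE A (Python) =====
-- def mid_idx_prefilter(start_indexes,end_indexes):
-- 	#this function finds pairs of indexes where both the start and end index
-- 	#are inside of another start/end index, and removes them from the list.
--
-- 	start_indexes.reverse()
-- 	end_indexes.reverse()
--
-- 	start_indexes_filt=[]
-- 	end_indexes_filt=[]
--
-- 	#check the next index to make sure it is at a position that is greater than the current index
-- 	#if so pass the pair, if not ignore them.
-- 	end_index_store=end_indexes[0]
--
-- 	for x in range(len(end_indexes)):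
-- 		if end_indexes[x] <= end_index_store:
-- 			start_indexes_filt.append(start_indexes[x])
-- 			end_indexes_filt.append(end_indexes[x])
-- 			end_index_store=end_indexes[x]
--
-- 	start_indexes_filt.reverse()
-- 	end_indexes_filt.reverse()
--
-- 	return start_indexes_filt,end_indexes_filt
-- ===== SOURCE B (Python) =====
-- def mid_idx_prefilter(start_indexes, end_indexes):
--     # Two-pass decomposition: build the running-minimum (prefix-min) table of the
--     # reversed end_indexes, then select each position whose end equals its prefix min.
--     start_indexes.reverse()
--     end_indexes.reverse()
--
--     m = end_indexes[0]
--     prefix_mins = []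
--     for e in end_indexes:
--         m = min(m, e)
--         prefix_mins.append(m)
--
--     keep = [i for i, (e, pm) in enumerate(zip(end_indexes, prefix_mins)) if e == pm]
--
--     start_indexes_filt = [start_indexes[i] for i in keep]
--     end_indexes_filt = [end_indexes[i] for i in keep]
--
--     start_indexes_filt.reverse()
--     end_indexes_filt.reverse()
--
--     return start_indexes_filt, end_indexes_filt
-- ===== Notes on version B (the rewrite author's own statement) =====
-- stated objective: alternative
-- what changed: B replaces A's single stateful loop (running store with conditional appends) by a two-pass decomposition: it first materializes the prefix-minimum table of the reversed end_indexes, then selects by position the pairs whose end equals its prefix minimum.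
import Mathlib
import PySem

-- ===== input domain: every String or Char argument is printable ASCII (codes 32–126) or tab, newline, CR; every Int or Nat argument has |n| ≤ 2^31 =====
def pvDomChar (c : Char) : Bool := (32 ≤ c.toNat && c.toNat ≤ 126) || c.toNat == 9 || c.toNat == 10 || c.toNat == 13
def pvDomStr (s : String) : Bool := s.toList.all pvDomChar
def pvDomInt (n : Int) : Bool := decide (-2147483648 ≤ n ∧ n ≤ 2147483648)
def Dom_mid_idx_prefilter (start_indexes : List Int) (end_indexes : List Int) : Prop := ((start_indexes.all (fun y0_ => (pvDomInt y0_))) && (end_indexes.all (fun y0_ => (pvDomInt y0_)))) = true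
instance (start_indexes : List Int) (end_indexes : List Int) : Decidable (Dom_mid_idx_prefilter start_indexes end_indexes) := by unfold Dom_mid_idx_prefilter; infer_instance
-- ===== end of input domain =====

-- B changes the decomposition only (prefix-minimum table + positional selection instead of
-- A's single stateful loop); both Pythons reverse their list arguments in place, and the
-- equivalence proved here is about the return value.

-- ===== PORT A =====
def mid_idx_prefilter (start_indexes : List Int) (end_indexes : List Int) : List Int × List Int :=
  let sr := start_indexes.reverse
  let er := end_indexes.reverse
  let store0 := PySem.List.pyGetD er 0 0
  let r := (PySem.List.pyRange 0 (er.length : Int) 1).foldl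
    (fun (st : List Int × List Int × Int) x =>
      if PySem.List.pyGetD er x 0 ≤ st.2.2 then
        (st.1 ++ [PySem.List.pyGetD sr x 0], st.2.1 ++ [PySem.List.pyGetD er x 0],
         PySem.List.pyGetD er x 0)
      else st)
    ([], [], store0)
  (r.1.reverse, r.2.1.reverse)

-- ===== PORT B =====
def mid_idx_prefilter_alt (start_indexes : List Int) (end_indexes : List Int) : List Int × List Int :=
  let sr := start_indexes.reverse
  let er := end_indexes.reverse
  let m0 := PySem.List.pyGetD er 0 0
  let pm := (er.foldl
    (fun (acc : List Int × Int) ev => (acc.1 ++ [min acc.2 ev], min acc.2 ev)) ([], m0)).1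
  let keep := (PySem.List.enumerate (er.zip pm) 0).filterMap
    (fun p => if p.2.1 = p.2.2 then some p.1 else none)
  let starts := keep.map (fun i => PySem.List.pyGetD sr i 0)
  let ends := keep.map (fun i => PySem.List.pyGetD er i 0)
  (starts.reverse, ends.reverse)

-- ===== PRECONDITION & SPEC =====
-- Pre_ holds exactly where Python A returns: end_indexes is nonempty, and every position of the
-- reversed end list that attains the running minimum so far (exactly the positions the function
-- keeps, hence indexes start_indexes at) lies within start_indexes; elsewhere A raises IndexError.
def Pre_mid_idx_prefilter (start_indexes : List Int) (end_indexes : List Int) : Prop :=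
  end_indexes ≠ [] ∧
  ∀ i, i < end_indexes.length →
    ((∀ j, j ≤ i → end_indexes.reverse.getD i 0 ≤ end_indexes.reverse.getD j 0) →
      i < start_indexes.length)
instance (start_indexes : List Int) (end_indexes : List Int) : Decidable (Pre_mid_idx_prefilter start_indexes end_indexes) := by unfold Pre_mid_idx_prefilter; infer_instance

def pvWitness_mid_idx_prefilter : List Int × List Int := ([2, 10, 12], [8, 9, 20])

def Spec_mid_idx_prefilter (start_indexes : List Int) (end_indexes : List Int) (out : List Int × List Int) : Prop := out = mid_idx_prefilter_alt start_indexes end_indexes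
instance (start_indexes : List Int) (end_indexes : List Int) (out : List Int × List Int) : Decidable (Spec_mid_idx_prefilter start_indexes end_indexes out) := by unfold Spec_mid_idx_prefilter; infer_instance

-- ===== CLAIM (what is proved, stated in full; the proofs are below) =====
def Claim_equal_mid_idx_prefilter : Prop := ∀ (start_indexes : List Int) (end_indexes : List Int), Dom_mid_idx_prefilter start_indexes end_indexes → Pre_mid_idx_prefilter start_indexes end_indexes → Spec_mid_idx_prefilter start_indexes end_indexes (mid_idx_prefilter start_indexes end_indexes)

-- ===== LEMMAS AND PROOFS =====

-- the kept absolute indices (as Ints), starting at position s with running store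
def keptRun (s store : Int) : List Int → List Int
  | [] => []
  | e :: t => if e ≤ store then s :: keptRun (s + 1) e t else keptRun (s + 1) store t

-- the final value of the running store
def lastStore (store : Int) : List Int → Int
  | [] => store
  | e :: t => if e ≤ store then lastStore e t else lastStore store t

-- prefix minima of a list, seeded with store
def scanMin (store : Int) : List Int → List Int
  | [] => []
  | e :: t => min store e :: scanMin (min store e) t

theorem foldPM (l : List Int) (acc : List Int) (store : Int) :
    (l.foldl (fun (a : List Int × Int) ev => (a.1 ++ [min a.2 ev], min a.2 ev)) (acc, store)).1
      = acc ++ scanMin store l := by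
  induction l generalizing acc store with
  | nil => simp [scanMin]
  | cons e t ih => simp [List.foldl_cons, scanMin, ih]

theorem keepB (l : List Int) (s store : Int) :
    (PySem.List.enumerate (l.zip (scanMin store l)) s).filterMap
        (fun p => if p.2.1 = p.2.2 then some p.1 else none)
      = keptRun s store l := by
  induction l generalizing s store with
  | nil => simp [scanMin, keptRun, PySem.List.enumerate_nil]
  | cons e t ih =>
    simp only [scanMin, List.zip_cons_cons, PySem.List.enumerate_cons, List.filterMap_cons]
    by_cases h : e ≤ store
    · simp [keptRun, h, (by omega : min store e = e), ih]
    · have hm : min store e = store := by omega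
      have hne : e ≠ store := by omega
      simp [keptRun, h, hm, hne, ih]

theorem loopA (er : List Int) (g : Int → Int) (l : List Int) (a : Nat) (store : Int)
    (accS accE : List Int) (hd : er.drop a = l) (ha : a ≤ er.length) :
    (PySem.List.pyRange (a : Int) (er.length : Int) 1).foldl
      (fun (st : List Int × List Int × Int) x =>
        if PySem.List.pyGetD er x 0 ≤ st.2.2 then
          (st.1 ++ [g x], st.2.1 ++ [PySem.List.pyGetD er x 0], PySem.List.pyGetD er x 0)
        else st)
      (accS, accE, store)
    = (accS ++ (keptRun (a : Int) store l).map g,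
       accE ++ (keptRun (a : Int) store l).map (fun i => PySem.List.pyGetD er i 0),
       lastStore store l) := by
  induction l generalizing a store accS accE with
  | nil =>
    have : a = er.length := by
      have := congrArg List.length hd; simp at this; omega
    subst this
    rw [PySem.List.pyRange_one_eq_nil (by omega)]
    simp [keptRun, lastStore]
  | cons e t ih =>
    have hlt : a < er.length := by
      by_contra hc
      have : er.drop a = [] := List.drop_eq_nil_of_le (by omega)
      rw [hd] at this; exact List.cons_ne_nil _ _ this
    have hget : PySem.List.pyGetD er (a : Int) 0 = e := by
      have hgv : er[a]'hlt = e := by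
        have h0 : (er.drop a)[0]'(by rw [hd]; simp) = e := by simp [hd]
        simpa using h0
      rw [PySem.List.pyGetD_natCast]
      simp [List.getD, List.getElem?_eq_getElem hlt, hgv]
    have htail : er.drop (a + 1) = t := by
      have := congrArg List.tail hd
      simpa [List.tail_drop] using this
    rw [PySem.List.pyRange_one_cons (by exact_mod_cast hlt)]
    simp only [List.foldl_cons, hget]
    by_cases h : e ≤ store
    · rw [if_pos h]
      have := ih (a := a + 1) (store := e)
        (accS := accS ++ [g (a : Int)]) (accE := accE ++ [e])
        htail (by omega)
      rw [(by push_cast; ring : ((a : Int) + 1) = ((a + 1 : Nat) : Int))]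
      rw [this]
      simp [keptRun, lastStore, h, hget]
    · rw [if_neg h]
      have := ih (a := a + 1) (store := store) (accS := accS) (accE := accE) htail (by omega)
      rw [(by push_cast; ring : ((a : Int) + 1) = ((a + 1 : Nat) : Int))]
      rw [this]
      simp [keptRun, lastStore, h]

theorem loopA0 (er : List Int) (g : Int → Int) (store : Int) :
    (PySem.List.pyRange 0 (er.length : Int) 1).foldl
      (fun (st : List Int × List Int × Int) x =>
        if PySem.List.pyGetD er x 0 ≤ st.2.2 then
          (st.1 ++ [g x], st.2.1 ++ [PySem.List.pyGetD er x 0], PySem.List.pyGetD er x 0)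
        else st)
      ([], [], store)
    = ((keptRun 0 store er).map g,
       (keptRun 0 store er).map (fun i => PySem.List.pyGetD er i 0),
       lastStore store er) := by
  have := loopA er g er 0 store [] [] (by simp) (by omega)
  simpa using this

-- ===== VERDICT (by name: the statement is the Claim_ definition above) =====
theorem mid_idx_prefilter_spec : Claim_equal_mid_idx_prefilter := by
  intro s e _ _
  unfold Spec_mid_idx_prefilter mid_idx_prefilter mid_idx_prefilter_alt
  simp only [foldPM, List.nil_append]
  rw [keepB e.reverse 0 (PySem.List.pyGetD e.reverse 0 0)]
  rw [loopA0 e.reverse (fun i => PySem.List.pyGetD s.reverse i 0)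
        (PySem.List.pyGetD e.reverse 0 0)]
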